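-- pv_equiv track=rewrite | github.com/marieke-woensdregt/repair_compositionality | check_my_implementation_against_simlang_one.py | create_all_possible_forms
-- ===== SOURCE A (Python) =====
-- import string
-- import itertools
--
-- def create_all_possible_forms(n_characters, form_length_list):
--     """
--     Takes a number of characters and a list of allowed form lengths, and creates a list of all possible complete forms
--     based on that.
--
--     :param n_characters: the number of different characters that may be used
--     :param form_length_list: a list of all form lengths that are allowed
--     :return: a list of all possible complete forms
--     """
--     alphabet = string.ascii_lowercase
--     form_alphabet = alphabet[:n_characters]
--     all_forms = []
--     for length in form_length_list:
--         all_forms = all_forms+list(itertools.product(form_alphabet, repeat=length))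
--     all_forms_as_strings = []
--     for form in all_forms:
--         string_form = ''
--         for i in range(len(form)):
--             string_form = string_form+form[i]
--         all_forms_as_strings.append(string_form)
--     return all_forms_as_strings
-- ===== SOURCE B (Python) =====
-- import string
--
--
-- def create_all_possible_forms(n_characters, form_length_list):
--     """Base-n counting enumeration: the k-th form of a given length is k written
--     in base len(form_alphabet), most-significant digit first."""
--     form_alphabet = string.ascii_lowercase[:n_characters]
--     base = len(form_alphabet)
--     result = []
--     for length in form_length_list:
--         for idx in range(base ** length):
--             digits = []
--             for _ in range(length):
--                 idx, d = divmod(idx, base)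
--                 digits.append(form_alphabet[d])
--             result.append(''.join(reversed(digits)))
--     return result
-- ===== Notes on version B (the rewrite author's own statement) =====
-- stated objective: alternative
-- what changed: Replaces itertools.product plus a per-form character-concatenation pass by direct base-n counting: the k-th form of each length is k written in base len(alphabet[:n_characters]), most-significant digit first, built in one pass.
import Mathlib
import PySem

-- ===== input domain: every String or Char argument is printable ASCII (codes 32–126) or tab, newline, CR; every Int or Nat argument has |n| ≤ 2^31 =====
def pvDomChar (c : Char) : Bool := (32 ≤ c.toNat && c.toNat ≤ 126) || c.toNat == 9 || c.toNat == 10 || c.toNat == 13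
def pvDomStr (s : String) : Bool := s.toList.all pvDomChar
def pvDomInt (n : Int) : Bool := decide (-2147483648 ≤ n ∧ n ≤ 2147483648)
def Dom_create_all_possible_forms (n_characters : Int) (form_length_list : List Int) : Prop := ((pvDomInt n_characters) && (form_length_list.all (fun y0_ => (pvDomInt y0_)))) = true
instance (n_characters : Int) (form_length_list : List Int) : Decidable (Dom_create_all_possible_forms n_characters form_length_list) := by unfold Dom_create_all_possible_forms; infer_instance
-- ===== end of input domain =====

-- B replaces itertools.product and the per-form character-join loop by base-n
-- counting: the k-th form of a length is k written in base |alphabet|, MSB first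
-- (objective: alternative — index arithmetic instead of the library product).

-- ===== PORT A =====
-- itertools.product(form_alphabet, repeat=length): leftmost position varies slowest
def pvProdRepeat (chars : List Char) : Nat → List (List Char)
  | 0 => [[]]
  | n + 1 => chars.flatMap (fun c => (pvProdRepeat chars n).map (c :: ·))

def create_all_possible_forms (n_characters : Int) (form_length_list : List Int) : List String :=
  let alphabet := "abcdefghijklmnopqrstuvwxyz".toList
  let form_alphabet := PySem.List.slice alphabet none (some n_characters)
  let all_forms := form_length_list.foldl
    (fun acc length => acc ++ pvProdRepeat form_alphabet length.toNat) []
  all_forms.foldl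
    (fun acc form => acc ++ [String.mk (form.foldl (fun s c => s ++ [c]) [])]) []

-- ===== PORT B =====
-- the `for _ in range(length): idx, d = divmod(idx, base)` loop of Source B: digits LSB first
def pvDigitsRev (idx base : Nat) : Nat → List Nat
  | 0 => []
  | n + 1 => (idx % base) :: pvDigitsRev (idx / base) base n

def create_all_possible_forms_alt (n_characters : Int) (form_length_list : List Int) : List String :=
  let form_alphabet := PySem.List.slice "abcdefghijklmnopqrstuvwxyz".toList none (some n_characters)
  let base := form_alphabet.length
  form_length_list.foldl
    (fun acc length => acc ++
      (List.range (base ^ length.toNat)).map (fun idx =>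
        String.mk (((pvDigitsRev idx base length.toNat).map
          (fun d => form_alphabet.getD d ' ')).reverse))) []

-- ===== PRECONDITION & SPEC =====
-- Pre_ excludes exactly the inputs with a negative length, on which Python A raises
-- ValueError (itertools.product rejects a negative repeat).
def Pre_create_all_possible_forms (n_characters : Int) (form_length_list : List Int) : Prop :=
  ∀ l ∈ form_length_list, 0 ≤ l
instance (n_characters : Int) (form_length_list : List Int) : Decidable (Pre_create_all_possible_forms n_characters form_length_list) := by unfold Pre_create_all_possible_forms; infer_instance

def pvWitness_create_all_possible_forms : Int × List Int := (2, [0, 1, 2])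

def Spec_create_all_possible_forms (n_characters : Int) (form_length_list : List Int) (out : List String) : Prop := out = create_all_possible_forms_alt n_characters form_length_list
instance (n_characters : Int) (form_length_list : List Int) (out : List String) : Decidable (Spec_create_all_possible_forms n_characters form_length_list out) := by unfold Spec_create_all_possible_forms; infer_instance

-- ===== CLAIM (what is proved, stated in full; the proofs are below) =====
def Claim_equal_create_all_possible_forms : Prop := ∀ (n_characters : Int) (form_length_list : List Int), Dom_create_all_possible_forms n_characters form_length_list → Pre_create_all_possible_forms n_characters form_length_list → Spec_create_all_possible_forms n_characters form_length_list (create_all_possible_forms n_characters form_length_list)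

-- ===== LEMMAS AND PROOFS =====

-- an accumulate-by-append foldl is init ++ flatMap
theorem pv_foldl_append {α β : Type} (f : α → List β) (l : List α) (init : List β) :
    l.foldl (fun acc x => acc ++ f x) init = init ++ l.flatMap f := by
  induction l generalizing init with
  | nil => simp
  | cons x t ih => simp [List.foldl_cons, ih]

theorem pv_map_getD_range {α : Type} (l : List α) (d : α) :
    (List.range l.length).map (fun i => l.getD i d) = l := by
  apply List.ext_getElem
  · simp
  · intro i h1 h2
    simp [List.getD, List.getElem?_eq_getElem h2]

theorem pv_range_mul (m k : Nat) :
    List.range (m * k) = (List.range m).flatMap (fun q => (List.range k).map (fun r => q * k + r)) := by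
  induction m with
  | zero => simp
  | succ m ih =>
      have : (m + 1) * k = m * k + k := by ring
      rw [this, List.range_add, List.range_succ, ih]
      simp [Nat.add_comm]

-- MSB-first reading of the LSB digit list
theorem pv_digits_msb (base n : Nat) : ∀ idx, idx < base ^ (n + 1) →
    (pvDigitsRev idx base (n + 1)).reverse
      = idx / base ^ n :: (pvDigitsRev (idx % base ^ n) base n).reverse := by
  induction n with
  | zero =>
      intro idx h
      simp [pvDigitsRev, Nat.mod_eq_of_lt (by simpa using h)]
  | succ n ih =>
      intro idx h
      have hbase : 0 < base := by
        rcases Nat.eq_zero_or_pos base with h0 | h0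
        · subst h0; simp at h
        · exact h0
      have hdiv : idx / base < base ^ (n + 1) := by
        rw [Nat.div_lt_iff_lt_mul hbase]
        calc idx < base ^ (n + 1 + 1) := h
          _ = base ^ (n + 1) * base := by ring
      have lhs : (pvDigitsRev idx base (n + 1 + 1)).reverse
          = (pvDigitsRev (idx / base) base (n + 1)).reverse ++ [idx % base] := by
        simp [pvDigitsRev]
      rw [lhs, ih (idx / base) hdiv]
      have h1 : idx / base / base ^ n = idx / base ^ (n + 1) := by
        rw [Nat.div_div_eq_div_mul, pow_succ, mul_comm base (base ^ n)]
      have h2 : idx / base % base ^ n = idx % base ^ (n + 1) / base := by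
        rw [pow_succ, mul_comm (base ^ n) base, Nat.mod_mul_right_div_self]
      have h3 : idx % base = idx % base ^ (n + 1) % base := by
        rw [Nat.mod_mod_of_dvd idx (dvd_pow_self base (Nat.succ_ne_zero n))]
      have rhs : (pvDigitsRev (idx % base ^ (n + 1)) base (n + 1)).reverse
          = (pvDigitsRev (idx % base ^ (n + 1) / base) base n).reverse
              ++ [idx % base ^ (n + 1) % base] := by
        simp [pvDigitsRev]
      rw [rhs, h1, h2, h3]
      simp

-- per-index: quotient/remainder of q*k+r
theorem pv_qr_div (q k r : Nat) (hr : r < k) : (q * k + r) / k = q := by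
  have hk : 0 < k := by omega
  rw [mul_comm, Nat.mul_add_div hk, Nat.div_eq_of_lt hr]
  omega
theorem pv_qr_mod (q k r : Nat) (hr : r < k) : (q * k + r) % k = r := by
  rw [add_comm, Nat.add_mul_mod_self_right, Nat.mod_eq_of_lt hr]

-- flatMap over a list is flatMap over its indices
theorem pv_flatMap_index {α β : Type} (l : List α) (d : α) (f : α → List β) :
    l.flatMap f = (List.range l.length).flatMap (fun q => f (l.getD q d)) := by
  conv_lhs => rw [← pv_map_getD_range l d]
  rw [List.flatMap_map]

-- the product list of A equals the index-counting list of B, per length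
theorem pv_prod_eq_count (fa : List Char) (n : Nat) :
    pvProdRepeat fa n
      = (List.range (fa.length ^ n)).map (fun idx =>
          ((pvDigitsRev idx fa.length n).map (fun d => fa.getD d ' ')).reverse) := by
  induction n with
  | zero => simp [pvProdRepeat, pvDigitsRev]
  | succ n ih =>
      rw [pvProdRepeat, ih, pv_flatMap_index fa ' ']
      have hpow : fa.length ^ (n + 1) = fa.length * fa.length ^ n := by ring
      rw [hpow, pv_range_mul, List.map_flatMap]
      apply List.flatMap_congr
      intro q hq
      rw [List.map_map, List.map_map]
      apply List.map_congr_left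
      intro r hr
      simp only [List.mem_range] at hq hr
      have hlt : q * fa.length ^ n + r < fa.length ^ (n + 1) := by
        calc q * fa.length ^ n + r < q * fa.length ^ n + fa.length ^ n := by omega
          _ = (q + 1) * fa.length ^ n := by ring
          _ ≤ fa.length * fa.length ^ n := Nat.mul_le_mul_right _ (by omega)
          _ = fa.length ^ (n + 1) := by ring
      simp only [Function.comp_apply, ← List.map_reverse]
      rw [pv_digits_msb fa.length n _ hlt, pv_qr_div q _ r hr, pv_qr_mod q _ r hr]
      simp

theorem pv_flatMap_single {α β : Type} (f : α → β) (l : List α) :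
    l.flatMap (fun a => [f a]) = l.map f := by
  induction l with
  | nil => rfl
  | cons x t ih => simp [List.flatMap_cons, ih]

theorem create_all_possible_forms_spec : Claim_equal_create_all_possible_forms := by
  unfold Claim_equal_create_all_possible_forms
  intro n_characters form_length_list _ _
  unfold Spec_create_all_possible_forms
  unfold create_all_possible_forms create_all_possible_forms_alt
  simp only [pv_foldl_append, List.nil_append, List.flatMap_assoc]
  apply List.flatMap_congr
  intro l _
  rw [pv_prod_eq_count]
  simp [List.flatMap_map, pv_flatMap_single]
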